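-- pv_equiv track=rewrite | github.com/Beliavsky/Pure-Fortran | xrepeat.py | remove_ws_outside_quotes
-- ===== SOURCE A (Python) =====
-- from typing import Dict, Iterable, List, Optional, Set, Tuple
--
-- def remove_ws_outside_quotes(text: str) -> str:
--     """Remove whitespace outside quotes."""
--     out: List[str] = []
--     in_single = False
--     in_double = False
--     for ch in text:
--         if ch == "'" and not in_double:
--             in_single = not in_single
--             out.append(ch)
--             continue
--         if ch == '"' and not in_single:
--             in_double = not in_double
--             out.append(ch)
--             continue
--         if ch.isspace() and not in_single and not in_double:
--             continue
--         out.append(ch)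
--     return "".join(out)
-- ===== SOURCE B (Python) =====
-- def remove_ws_outside_quotes(text: str) -> str:
--     """Remove whitespace outside quotes."""
--     out = []
--     i = 0
--     n = len(text)
--     while i < n:
--         ch = text[i]
--         if ch == "'" or ch == '"':
--             j = text.find(ch, i + 1)
--             if j == -1:
--                 out.append(text[i:])
--                 i = n
--             else:
--                 out.append(text[i:j + 1])
--                 i = j + 1
--         else:
--             if not ch.isspace():
--                 out.append(ch)
--             i += 1
--     return "".join(out)
-- ===== Notes on version B (the rewrite author's own statement) =====
-- stated objective: alternative
-- what changed: Replaced the per-character two-boolean state machine with a region-based scan that, on an opening quote, jumps straight to the matching close quote with str.find and copies the whole quoted slice verbatim, filtering whitespace only in the unquoted gaps.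
import Mathlib
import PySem

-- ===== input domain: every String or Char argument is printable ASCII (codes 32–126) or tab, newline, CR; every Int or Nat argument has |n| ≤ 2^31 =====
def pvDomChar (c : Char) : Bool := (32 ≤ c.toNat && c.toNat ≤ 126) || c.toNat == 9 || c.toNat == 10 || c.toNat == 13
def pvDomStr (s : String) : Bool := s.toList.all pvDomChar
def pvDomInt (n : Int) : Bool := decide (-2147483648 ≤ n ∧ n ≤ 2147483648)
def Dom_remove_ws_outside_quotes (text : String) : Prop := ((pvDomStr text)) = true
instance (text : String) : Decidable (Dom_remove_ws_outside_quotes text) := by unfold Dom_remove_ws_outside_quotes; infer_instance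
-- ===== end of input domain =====

-- B replaces A's per-character two-flag state machine by a region-based scan that jumps
-- to the matching close quote and emits each quoted region verbatim (objective: alternative).

-- ===== PORT A =====
-- per-character loop with in_single/in_double flags, appending to out
def aGo : List Char → Bool → Bool → List Char
  | [], _, _ => []
  | ch :: rest, is_, id_ =>
    if ch == '\'' && !id_ then ch :: aGo rest (!is_) id_
    else if ch == '"' && !is_ then ch :: aGo rest is_ (!id_)
    else if PySem.Chars.isspace ch && !is_ && !id_ then aGo rest is_ id_
    else ch :: aGo rest is_ id_

def remove_ws_outside_quotes (text : String) : String :=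
  String.ofList (aGo text.toList false false)

-- ===== PORT B =====
-- region scan: on a quote, find the matching close quote (text.find) and copy the slice verbatim
def altGo : List Char → List Char
  | [] => []
  | ch :: rest =>
    if ch == '\'' || ch == '"' then
      match rest.findIdx? (· == ch) with
      | none => ch :: rest            -- unterminated: copy the tail verbatim
      | some j => ch :: rest.take (j + 1) ++ altGo (rest.drop (j + 1))
    else if PySem.Chars.isspace ch then altGo rest
    else ch :: altGo rest
termination_by l => l.length
decreasing_by all_goals simp only [List.length_drop, List.length_cons]; omega

def remove_ws_outside_quotes_alt (text : String) : String :=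
  String.ofList (altGo text.toList)

-- ===== PRECONDITION & SPEC =====
def Spec_remove_ws_outside_quotes (text : String) (out : String) : Prop := out = remove_ws_outside_quotes_alt text
instance (text : String) (out : String) : Decidable (Spec_remove_ws_outside_quotes text out) := by unfold Spec_remove_ws_outside_quotes; infer_instance

-- ===== CLAIM (what is proved, stated in full; the proofs are below) =====
def Claim_equal_remove_ws_outside_quotes : Prop := ∀ (text : String), Dom_remove_ws_outside_quotes text → Spec_remove_ws_outside_quotes text (remove_ws_outside_quotes text)

-- ===== LEMMAS AND PROOFS =====

-- inside a single-quoted region A copies verbatim up to and including the closing quote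
lemma aGo_single (l : List Char) :
    aGo l true false =
      match l.findIdx? (· == '\'') with
      | none => l
      | some j => l.take (j + 1) ++ aGo (l.drop (j + 1)) false false := by
  induction l with
  | nil => rfl
  | cons ch rest ih =>
    by_cases h : ch = '\''
    · subst h; simp [aGo, List.findIdx?_cons]
    · simp [aGo, List.findIdx?_cons, h]
      cases hj : rest.findIdx? (· == '\'') with
      | none => simpa [hj] using ih
      | some j => simp [hj] at ih; simp [ih]

-- inside a double-quoted region A copies verbatim up to and including the closing quote
lemma aGo_double (l : List Char) :
    aGo l false true =
      match l.findIdx? (· == '"') with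
      | none => l
      | some j => l.take (j + 1) ++ aGo (l.drop (j + 1)) false false := by
  induction l with
  | nil => rfl
  | cons ch rest ih =>
    by_cases h : ch = '"'
    · subst h; simp [aGo, List.findIdx?_cons]
    · simp [aGo, List.findIdx?_cons, h]
      cases hj : rest.findIdx? (· == '"') with
      | none => simpa [hj] using ih
      | some j => simp [hj] at ih; simp [ih]

lemma aGo_eq_altGo : ∀ n (l : List Char), l.length ≤ n → aGo l false false = altGo l := by
  intro n
  induction n with
  | zero => intro l hl; simp at hl; simp [hl, aGo, altGo]
  | succ n ih =>
    intro l hl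
    cases l with
    | nil => simp [aGo, altGo]
    | cons ch rest =>
      simp at hl
      by_cases hs : ch = '\''
      · subst hs
        rw [show aGo ('\'' :: rest) false false = '\'' :: aGo rest true false from rfl,
            aGo_single rest]
        cases hj : rest.findIdx? (· == '\'') with
        | none => simp [altGo, hj]
        | some j =>
          have hd : (rest.drop (j + 1)).length ≤ n :=
            le_trans (by simp) hl
          simp [altGo, hj, ih _ hd]
      · by_cases hd : ch = '"'
        · subst hd
          rw [show aGo ('"' :: rest) false false = '"' :: aGo rest false true from rfl,
              aGo_double rest]
          cases hj : rest.findIdx? (· == '"') with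
          | none => simp [altGo, hj]
          | some j =>
            have hdl : (rest.drop (j + 1)).length ≤ n :=
              le_trans (by simp) hl
            simp [altGo, hj, ih _ hdl]
        · simp [aGo, altGo, hs, hd, ih rest hl]

-- ===== VERDICT (by name: the statement is the Claim_ definition above) =====
theorem remove_ws_outside_quotes_spec : Claim_equal_remove_ws_outside_quotes := by
  intro text _
  unfold Spec_remove_ws_outside_quotes remove_ws_outside_quotes remove_ws_outside_quotes_alt
  rw [aGo_eq_altGo text.toList.length text.toList le_rfl]
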